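-- pv_equiv track=rewrite | github.com/ZJUguquan/Leetcode | codewars/last_digit.py | loop
-- ===== SOURCE A (Python) =====
-- def loop(a):
--     a = a % 10
--     if str(a) in ('0', '1', '5', '6'):
--         return 1
--
--     i = 2
--     now = a * a % 10
--
--     while now != a:
--         now = now * a % 10
--         i += 1
--     return i - 1
-- ===== SOURCE B (Python) =====
-- # Closed-form lookup: last-digit power cycle lengths are fixed per digit; no loop.
-- _CYCLE = {0: 1, 1: 1, 2: 4, 3: 4, 4: 2, 5: 1, 6: 1, 7: 4, 8: 4, 9: 2}
--
-- def loop(a):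
--     return _CYCLE[a % 10]
-- ===== Notes on version B (the rewrite author's own statement) =====
-- stated objective: simpler
-- what changed: Replaced the iterative search for the power cycle of the last digit with a precomputed 10-entry lookup table indexed by a % 10; no loop and no string test remain.
import Mathlib
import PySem

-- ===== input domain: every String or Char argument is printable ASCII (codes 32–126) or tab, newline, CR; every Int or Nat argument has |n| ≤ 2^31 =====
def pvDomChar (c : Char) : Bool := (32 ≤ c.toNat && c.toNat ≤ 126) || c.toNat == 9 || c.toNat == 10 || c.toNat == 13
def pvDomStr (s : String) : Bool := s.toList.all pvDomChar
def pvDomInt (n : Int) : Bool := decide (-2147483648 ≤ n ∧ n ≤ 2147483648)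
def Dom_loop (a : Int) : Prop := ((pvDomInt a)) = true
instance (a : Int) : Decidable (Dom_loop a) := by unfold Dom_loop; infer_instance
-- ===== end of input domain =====

-- B replaces A's iterative cycle search by a fixed 10-entry lookup table; objective: simpler.

-- ===== PORT A =====
-- A's while loop, step for step; the Nat argument is a fuel guard for totality only
-- (the loop re-reaches a within at most 3 multiplications since digits cycle mod 10).
def loopWhile (a now i : Int) : Nat → Int
  | 0 => i
  | fuel + 1 => if now ≠ a then loopWhile a (PySem.Int.mod (now * a) 10) (i + 1) fuel else i

def loop (a : Int) : Int :=
  let a := PySem.Int.mod a 10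
  if PySem.Int.toStr a = "0" ∨ PySem.Int.toStr a = "1" ∨ PySem.Int.toStr a = "5" ∨ PySem.Int.toStr a = "6" then 1
  else loopWhile a (PySem.Int.mod (a * a) 10) 2 8 - 1

-- ===== PORT B =====
def pvCycleTable : PySem.Dict Int Int :=
  PySem.Dict.ofList [(0, 1), (1, 1), (2, 4), (3, 4), (4, 2), (5, 1), (6, 1), (7, 4), (8, 4), (9, 2)]

-- dict lookup; the key a % 10 is always present (0 ≤ a % 10 < 10), so the default 0 is unreachable
def loop_alt (a : Int) : Int :=
  PySem.Dict.getD pvCycleTable (PySem.Int.mod a 10) 0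

-- ===== PRECONDITION & SPEC =====
def Spec_loop (a : Int) (out : Int) : Prop := out = loop_alt a
instance (a : Int) (out : Int) : Decidable (Spec_loop a out) := by unfold Spec_loop; infer_instance

-- ===== CLAIM (what is proved, stated in full; the proofs are below) =====
def Claim_equal_loop : Prop := ∀ (a : Int), Dom_loop a → Spec_loop a (loop a)

-- ===== LEMMAS AND PROOFS =====
theorem loop_core (r : Int) (h0 : 0 ≤ r) (h1 : r < 10) :
    (if PySem.Int.toStr r = "0" ∨ PySem.Int.toStr r = "1" ∨ PySem.Int.toStr r = "5" ∨ PySem.Int.toStr r = "6" then 1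
     else loopWhile r (PySem.Int.mod (r * r) 10) 2 8 - 1) = PySem.Dict.getD pvCycleTable r 0 := by
  interval_cases r <;> decide

theorem loop_eq_alt (a : Int) : loop a = loop_alt a := by
  simp only [loop, loop_alt]
  exact loop_core _ (PySem.Int.mod_nonneg a (by norm_num)) (PySem.Int.mod_lt a (by norm_num))

-- ===== VERDICT (by name: the statement is the Claim_ definition above) =====
theorem loop_spec : Claim_equal_loop := by
  intro a _
  unfold Spec_loop
  exact loop_eq_alt a
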